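-- pv_equiv track=rewrite | github.com/MajorThird/lilypond-piano-trainer | staff.py | get_isolated_fragment
-- ===== SOURCE A (Python) =====
-- def get_isolated_fragment(f, remove_octave_characters=True):
--     split_characters = ["_", "^", "\\", "-"]
--     for c in split_characters:
--         f = f.split(c)[0]
--     remove_characters = ["(", ")", "[", "]", ".", "<", ">", "~"]
--     if remove_octave_characters:
--         for i in range(1,10):
--             remove_characters.append("'" * i)
--             remove_characters.append("," * i)
--     for c in remove_characters:
--         f = f.replace(c, "")
--
--     f = ''.join([c for c in f if not c.isdigit()]) # remove digits
--     return f
-- ===== SOURCE B (Python) =====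
-- def get_isolated_fragment(f, remove_octave_characters=True):
--     stop = {'_', '^', '\\', '-'}
--     drop = {'(', ')', '[', ']', '.', '<', '>', '~'}
--     if remove_octave_characters:
--         drop |= {"'", ','}
--     out = []
--     for c in f:
--         if c in stop:
--             break
--         if c in drop or c.isdigit():
--             continue
--         out.append(c)
--     return ''.join(out)
-- ===== Notes on version B (the rewrite author's own statement) =====
-- stated objective: simpler
-- what changed: Replaces A's four sequential split() passes, the 26-entry replace() loop (including the redundant multi-apostrophe/comma patterns) and the digit comprehension with one left-to-right scan that breaks at the first split character and filters out removed characters and digits.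
import Mathlib
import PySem

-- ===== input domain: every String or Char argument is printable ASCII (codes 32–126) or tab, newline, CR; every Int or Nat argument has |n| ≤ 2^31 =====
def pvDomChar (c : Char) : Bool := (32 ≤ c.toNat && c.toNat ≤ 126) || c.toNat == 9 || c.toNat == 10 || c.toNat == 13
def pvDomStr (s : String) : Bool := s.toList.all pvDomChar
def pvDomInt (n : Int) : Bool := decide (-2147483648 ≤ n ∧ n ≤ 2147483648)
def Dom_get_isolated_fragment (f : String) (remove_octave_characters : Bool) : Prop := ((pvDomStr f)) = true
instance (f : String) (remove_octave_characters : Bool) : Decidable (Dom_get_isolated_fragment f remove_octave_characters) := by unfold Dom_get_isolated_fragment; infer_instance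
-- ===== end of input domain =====

-- B replaces A's four sequential split() passes, 26-entry replace() loop and digit comprehension
-- by a single left-to-right scan that stops at the first split character and filters the rest (objective: simpler).


-- ===== PORT A =====
-- literal transliteration of A: four f.split(c)[0] passes, the remove_characters list
-- (extended with "'"*i / ","*i for i in 1..9 when remove_octave_characters), the replace loop,
-- then ''.join of the non-digit characters.  f.split(c)[0] never raises (split is nonempty),
-- ported as headD [].
def get_isolated_fragment (f : String) (remove_octave_characters : Bool) : String :=
  let l1 := ['_', '^', '\\', '-'].foldl
      (fun s c => (PySem.Chars.splitOn s [c]).headD []) f.toList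
  let removeChars : List (List Char) :=
    if remove_octave_characters then
      (PySem.List.pyRange 1 10 1).foldl
        (fun acc i => (acc ++ [List.replicate i.toNat '\'']) ++ [List.replicate i.toNat ','])
        [['('], [')'], ['['], [']'], ['.'], ['<'], ['>'], ['~']]
    else [['('], [')'], ['['], [']'], ['.'], ['<'], ['>'], ['~']]
  let l2 := removeChars.foldl (fun s c => PySem.Chars.replace s c []) l1
  String.mk (PySem.Chars.join [] ((l2.filter (fun c => !PySem.Chars.isdigit c)).map (fun c => [c])))

-- ===== PORT B =====
-- B's loop: stop at the first split character, skip removed characters and digits, keep the rest.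
-- (B's Python literal sets are ported as the same literal lists; membership is identical.)
def pvScanB (stop drop : List Char) : List Char → List Char
  | [] => []
  | c :: t =>
    if stop.contains c then []
    else if drop.contains c || PySem.Chars.isdigit c then pvScanB stop drop t
    else c :: pvScanB stop drop t

def get_isolated_fragment_alt (f : String) (remove_octave_characters : Bool) : String :=
  let stop := ['_', '^', '\\', '-']
  let drop := if remove_octave_characters
    then ['(', ')', '[', ']', '.', '<', '>', '~', '\'', ',']
    else ['(', ')', '[', ']', '.', '<', '>', '~']
  String.mk (pvScanB stop drop f.toList)

-- ===== PRECONDITION & SPEC =====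
def Spec_get_isolated_fragment (f : String) (remove_octave_characters : Bool) (out : String) : Prop := out = get_isolated_fragment_alt f remove_octave_characters
instance (f : String) (remove_octave_characters : Bool) (out : String) : Decidable (Spec_get_isolated_fragment f remove_octave_characters out) := by unfold Spec_get_isolated_fragment; infer_instance

-- ===== CLAIM (what is proved, stated in full; the proofs are below) =====
def Claim_equal_get_isolated_fragment : Prop := ∀ (f : String) (remove_octave_characters : Bool), Dom_get_isolated_fragment f remove_octave_characters → Spec_get_isolated_fragment f remove_octave_characters (get_isolated_fragment f remove_octave_characters)

-- ===== LEMMAS AND PROOFS =====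

-- splitOn.go pushes finished pieces onto acc; result is acc.reverse ++ the rest
theorem pv_splitGo_acc (sep : List Char) (fuel : Nat) (l cur : List Char) (acc : List (List Char)) :
    PySem.Chars.splitOn.go sep fuel l cur acc = acc.reverse ++ PySem.Chars.splitOn.go sep fuel l cur [] := by
  induction fuel generalizing l cur acc with
  | zero => simp [PySem.Chars.splitOn.go.eq_def]
  | succ n ih =>
    cases l with
    | nil => simp [PySem.Chars.splitOn.go.eq_def]
    | cons c t =>
      rw [PySem.Chars.splitOn.go.eq_def]
      conv_rhs => rw [PySem.Chars.splitOn.go.eq_def]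
      by_cases h : sep.isPrefixOf (c :: t) <;> simp only [h, if_true, Bool.false_eq_true, reduceIte]
      · rw [ih _ _ (cur.reverse :: acc), ih _ _ [cur.reverse]]
        simp
      · exact ih t (c :: cur) acc

-- the first piece of a single-character split is the prefix before the first separator
theorem pv_splitGo_first (c : Char) (fuel : Nat) (l cur : List Char) (h : l.length ≤ fuel) :
    ∃ rest, PySem.Chars.splitOn.go [c] fuel l cur [] =
      (cur.reverse ++ l.takeWhile (fun x => x != c)) :: rest := by
  induction fuel generalizing l cur with
  | zero =>
    have : l = [] := by cases l <;> simp_all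
    subst this; exact ⟨[], by simp [PySem.Chars.splitOn.go.eq_def]⟩
  | succ n ih =>
    cases l with
    | nil => exact ⟨[], by simp [PySem.Chars.splitOn.go.eq_def]⟩
    | cons ch t =>
      rw [PySem.Chars.splitOn.go.eq_def]
      by_cases hc : ch = c
      · subst hc
        have hp : ([ch].isPrefixOf (ch :: t)) = true := by simp [List.isPrefixOf]
        simp only [hp, if_true, List.takeWhile, bne_self_eq_false, reduceIte]
        refine ⟨PySem.Chars.splitOn.go [ch] n (List.drop [ch].length (ch :: t)) [] [], ?_⟩
        rw [pv_splitGo_acc]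
        simp
      · have hp : ([c].isPrefixOf (ch :: t)) = false := by
          simp [List.isPrefixOf]; exact fun he => absurd he.symm hc
        simp only [hp, Bool.false_eq_true, reduceIte]
        obtain ⟨rest, hr⟩ := ih t (ch :: cur) (by simpa using Nat.le_of_succ_le_succ h)
        refine ⟨rest, ?_⟩
        rw [hr]
        have hb : (ch != c) = true := by simp [bne_iff_ne]; exact hc
        simp [List.takeWhile, hb]

theorem pv_split_head (c : Char) (s : List Char) :
    (PySem.Chars.splitOn s [c]).headD [] = s.takeWhile (fun x => x != c) := by
  unfold PySem.Chars.splitOn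
  obtain ⟨rest, hr⟩ := pv_splitGo_first c (s.length + 1) s [] (by omega)
  simp [hr]

-- replacing a single character by "" is a filter
theorem pv_replGo_single (c : Char) (fuel : Nat) (l acc : List Char) (h : l.length ≤ fuel) :
    PySem.Chars.replace.go [c] [] fuel l acc = acc.reverse ++ l.filter (fun x => x != c) := by
  induction fuel generalizing l acc with
  | zero =>
    have : l = [] := by cases l <;> simp_all
    subst this; simp [PySem.Chars.replace.go.eq_def]
  | succ n ih =>
    cases l with
    | nil => simp [PySem.Chars.replace.go.eq_def]
    | cons ch t =>
      rw [PySem.Chars.replace.go.eq_def]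
      by_cases hc : ch = c
      · subst hc
        have hp : ([ch].isPrefixOf (ch :: t)) = true := by simp [List.isPrefixOf]
        simp only [hp, if_true]
        rw [ih _ _ (by simpa using Nat.le_of_succ_le_succ h)]
        simp [List.filter]
      · have hp : ([c].isPrefixOf (ch :: t)) = false := by
          simp [List.isPrefixOf]; exact fun he => absurd he.symm hc
        simp only [hp, Bool.false_eq_true, reduceIte]
        rw [ih _ _ (by simpa using Nat.le_of_succ_le_succ h)]
        have hb : (ch != c) = true := by simp [bne_iff_ne]; exact hc
        simp [List.filter, hb]

theorem pv_replace_single (c : Char) (s : List Char) :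
    PySem.Chars.replace s [c] [] = s.filter (fun x => x != c) := by
  unfold PySem.Chars.replace
  simp only [List.isEmpty_cons, Bool.false_eq_true, reduceIte]
  simpa using pv_replGo_single c s.length s [] (le_refl _)

-- replacing a pattern whose first character does not occur is a no-op
theorem pv_replGo_notmem (c : Char) (rest new : List Char) (fuel : Nat) (l acc : List Char)
    (h : l.length ≤ fuel) (hm : c ∉ l) :
    PySem.Chars.replace.go (c :: rest) new fuel l acc = acc.reverse ++ l := by
  induction fuel generalizing l acc with
  | zero =>
    have : l = [] := by cases l <;> simp_all
    subst this; simp [PySem.Chars.replace.go.eq_def]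
  | succ n ih =>
    cases l with
    | nil => simp [PySem.Chars.replace.go.eq_def]
    | cons ch t =>
      rw [PySem.Chars.replace.go.eq_def]
      have hne : ch ≠ c := fun he => hm (by simp [he])
      have hp : ((c :: rest).isPrefixOf (ch :: t)) = false := by
        simp [List.isPrefixOf]; intro he; exact absurd he.symm hne
      simp only [hp, Bool.false_eq_true, reduceIte]
      rw [ih t (ch :: acc) (by simpa using Nat.le_of_succ_le_succ h) (fun hc => hm (by simp [hc]))]
      simp

theorem pv_replace_notmem (c : Char) (rest new : List Char) (s : List Char) (hm : c ∉ s) :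
    PySem.Chars.replace s (c :: rest) new = s := by
  unfold PySem.Chars.replace
  simp only [List.isEmpty_cons, Bool.false_eq_true, reduceIte]
  simpa using pv_replGo_notmem c rest new s.length s [] (le_refl _) hm

-- B's scan is filter-after-takeWhile
theorem pv_scan_eq (stop drop : List Char) (l : List Char) :
    pvScanB stop drop l =
      (l.takeWhile (fun c => !stop.contains c)).filter
        (fun c => !(drop.contains c || PySem.Chars.isdigit c)) := by
  induction l with
  | nil => simp [pvScanB]
  | cons c t ih =>
    rw [pvScanB]
    by_cases hs : c ∈ stop
    · simp [hs, List.takeWhile]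
    · by_cases hd1 : c ∈ drop <;> by_cases hd2 : PySem.Chars.isdigit c <;>
        simp [hs, hd1, hd2, List.takeWhile, List.filter, ih]

-- (a == b) in simp normal form decide
theorem pv_beq_decide (a b : Char) : (a == b) = decide (a = b) := by
  by_cases h : a = b <;> simp [h]

theorem pv_decide_id (b : Bool) : decide (b = true) = b := by cases b <;> simp

-- filter-of-takeWhile is determined by the predicates pointwise
theorem pv_ft_ext (p1 p2 q1 q2 : Char → Bool) (hp : ∀ a, p1 a = p2 a) (hq : ∀ a, q1 a = q2 a)
    (l : List Char) : (l.takeWhile q1).filter p1 = (l.takeWhile q2).filter p2 := by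
  rw [funext hp, funext hq]

-- the remove_characters list A builds when remove_octave_characters is true
theorem pv_removeChars_true :
    ((PySem.List.pyRange 1 10 1).foldl
        (fun acc i => (acc ++ [List.replicate i.toNat '\'']) ++ [List.replicate i.toNat ','])
        [['('], [')'], ['['], [']'], ['.'], ['<'], ['>'], ['~']]) =
    [['('],
      [')'],
      ['['],
      [']'],
      ['.'],
      ['<'],
      ['>'],
      ['~'],
      ['\''],
      [','],
      ['\'', '\''],
      [',', ','],
      ['\'', '\'', '\''],
      [',', ',', ','],
      ['\'', '\'', '\'', '\''],
      [',', ',', ',', ','],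
      ['\'', '\'', '\'', '\'', '\''],
      [',', ',', ',', ',', ','],
      ['\'', '\'', '\'', '\'', '\'', '\''],
      [',', ',', ',', ',', ',', ','],
      ['\'', '\'', '\'', '\'', '\'', '\'', '\''],
      [',', ',', ',', ',', ',', ',', ','],
      ['\'', '\'', '\'', '\'', '\'', '\'', '\'', '\''],
      [',', ',', ',', ',', ',', ',', ',', ','],
      ['\'', '\'', '\'', '\'', '\'', '\'', '\'', '\'', '\''],
      [',', ',', ',', ',', ',', ',', ',', ',', ',']] := by decide

-- folding replace over patterns whose first character is absent from l is a no-op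
theorem pv_fold_noop (olds : List (List Char)) (l : List Char)
    (h : ∀ o ∈ olds, ∃ c rest, o = c :: rest ∧ c ∉ l) :
    olds.foldl (fun s c => PySem.Chars.replace s c []) l = l := by
  induction olds with
  | nil => rfl
  | cons o t ih =>
    obtain ⟨c, rest, rfl, hc⟩ := h o (List.mem_cons_self ..)
    rw [List.foldl_cons, pv_replace_notmem c rest [] l hc]
    exact ih (fun o ho => h o (List.mem_cons_of_mem _ ho))

-- the 16 multi-character octave patterns, in A's order
def pvTail16 : List (List Char) :=
    [['\'', '\''],
      [',', ','],
      ['\'', '\'', '\''],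
      [',', ',', ','],
      ['\'', '\'', '\'', '\''],
      [',', ',', ',', ','],
      ['\'', '\'', '\'', '\'', '\''],
      [',', ',', ',', ',', ','],
      ['\'', '\'', '\'', '\'', '\'', '\''],
      [',', ',', ',', ',', ',', ','],
      ['\'', '\'', '\'', '\'', '\'', '\'', '\''],
      [',', ',', ',', ',', ',', ',', ','],
      ['\'', '\'', '\'', '\'', '\'', '\'', '\'', '\''],
      [',', ',', ',', ',', ',', ',', ',', ','],
      ['\'', '\'', '\'', '\'', '\'', '\'', '\'', '\'', '\''],
      [',', ',', ',', ',', ',', ',', ',', ',', ',']]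

-- ===== VERDICT (by name: the statement is the Claim_ definition above) =====
set_option maxHeartbeats 1000000 in
theorem get_isolated_fragment_spec : Claim_equal_get_isolated_fragment := by
  intro f roc _
  unfold Spec_get_isolated_fragment
  cases roc
  · simp only [get_isolated_fragment, get_isolated_fragment_alt, Bool.false_eq_true, reduceIte,
      List.foldl_cons, List.foldl_nil, pv_scan_eq, pv_split_head, List.takeWhile_takeWhile,
      pv_replace_single, List.filter_filter, PySem.Chars.join_nil_singletons]
    refine congrArg String.mk (pv_ft_ext _ _ _ _ (fun a => ?_) (fun a => ?_) f.toList) <;>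
      (simp only [bne, List.contains_eq_mem, List.mem_cons, List.not_mem_nil, or_false,
        Bool.decide_or, Bool.not_or, Bool.decide_and, pv_decide_id, pv_beq_decide,
        Bool.not_not]; ac_rfl)
  · simp only [get_isolated_fragment, get_isolated_fragment_alt, reduceIte, pv_removeChars_true]
    rw [show ([['('], [')'], ['['], [']'], ['.'], ['<'], ['>'], ['~'], ['\''], [','], ['\'', '\''], [',', ','], ['\'', '\'', '\''], [',', ',', ','], ['\'', '\'', '\'', '\''], [',', ',', ',', ','], ['\'', '\'', '\'', '\'', '\''], [',', ',', ',', ',', ','], ['\'', '\'', '\'', '\'', '\'', '\''], [',', ',', ',', ',', ',', ','], ['\'', '\'', '\'', '\'', '\'', '\'', '\''], [',', ',', ',', ',', ',', ',', ','], ['\'', '\'', '\'', '\'', '\'', '\'', '\'', '\''], [',', ',', ',', ',', ',', ',', ',', ','], ['\'', '\'', '\'', '\'', '\'', '\'', '\'', '\'', '\''], [',', ',', ',', ',', ',', ',', ',', ',', ',']] : List (List Char)) = [['('], [')'], ['['], [']'], ['.'], ['<'], ['>'], ['~'], ['\''], [',']] ++ pvTail16 from rfl,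
      List.foldl_append]
    simp only [List.foldl_cons, List.foldl_nil, pv_scan_eq, pv_split_head,
      List.takeWhile_takeWhile, pv_replace_single, List.filter_filter]
    rw [pv_fold_noop _ _ ?hno]
    case hno =>
      intro o ho
      simp only [pvTail16, List.mem_cons, List.not_mem_nil, or_false] at ho
      rcases ho with rfl|rfl|rfl|rfl|rfl|rfl|rfl|rfl|rfl|rfl|rfl|rfl|rfl|rfl|rfl|rfl <;>
        exact ⟨_, _, rfl, by simp⟩
    simp only [List.filter_filter, PySem.Chars.join_nil_singletons]
    refine congrArg String.mk (pv_ft_ext _ _ _ _ (fun a => ?_) (fun a => ?_) f.toList) <;>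
      (simp only [bne, List.contains_eq_mem, List.mem_cons, List.not_mem_nil, or_false,
        Bool.decide_or, Bool.not_or, Bool.decide_and, pv_decide_id, pv_beq_decide,
        Bool.not_not]; ac_rfl)
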